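-- pv_equiv track=rewrite | github.com/lara-371/ATP2022 | TPC6/obras.py | distAno
-- ===== SOURCE A (Python) =====
-- def distAno(obras):
--     res = {}
--     for _, _, ano, *_ in obras:
--         if ano in res.keys():
--             res[ano] += 1
--         else:
--             res[ano] = 1
--     return res
-- ===== SOURCE B (Python) =====
-- def distAno(obras):
--     anos = [ano for _, _, ano, *_ in obras]
--     return {ano: anos.count(ano) for ano in dict.fromkeys(anos)}
-- ===== Notes on version B (the rewrite author's own statement) =====
-- stated objective: simpler
-- what changed: Replaces the incremental membership-test/increment dict loop with a two-pass comprehension: extract the years, dedup them in first-occurrence order via dict.fromkeys, and map each distinct year to anos.count(ano).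
import Mathlib
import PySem

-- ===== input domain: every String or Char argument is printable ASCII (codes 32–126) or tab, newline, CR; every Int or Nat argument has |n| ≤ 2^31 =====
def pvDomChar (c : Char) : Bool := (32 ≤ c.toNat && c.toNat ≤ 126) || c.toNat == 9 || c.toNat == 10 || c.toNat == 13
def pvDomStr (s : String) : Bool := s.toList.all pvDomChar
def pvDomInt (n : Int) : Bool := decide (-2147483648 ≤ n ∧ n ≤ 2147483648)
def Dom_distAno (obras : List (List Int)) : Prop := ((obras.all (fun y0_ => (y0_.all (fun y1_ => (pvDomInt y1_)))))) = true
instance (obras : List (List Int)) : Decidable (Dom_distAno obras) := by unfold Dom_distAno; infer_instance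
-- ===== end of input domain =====

-- B replaces A's incremental dict counter with a dedup-then-count comprehension (same values, no speed claim).

-- ===== PORT A =====
-- 'for _, _, ano, *_ in obras' binds the third element of each row; under Pre_ every
-- row has length ≥ 3, so '(PySem.List.pyGet? row 2).getD 0' is exactly that element.
def distAno (obras : List (List Int)) : List (Int × Int) :=
  (obras.foldl
    (fun res row =>
      let ano := (PySem.List.pyGet? row 2).getD 0
      if res.contains ano then res.insert ano (res.getD ano 0 + 1)
      else res.insert ano 1)
    PySem.Dict.empty).items

-- ===== PORT B =====
def distAno_alt (obras : List (List Int)) : List (Int × Int) :=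
  let anos := obras.map (fun row => (PySem.List.pyGet? row 2).getD 0)
  (PySem.List.dedup anos).map (fun ano => (ano, (anos.count ano : Int)))

-- ===== PRECONDITION & SPEC =====
-- Pre_ excludes rows with fewer than 3 elements, on which A's tuple unpacking raises ValueError.
def Pre_distAno (obras : List (List Int)) : Prop :=
  ∀ row ∈ obras, 3 ≤ row.length
instance (obras : List (List Int)) : Decidable (Pre_distAno obras) := by unfold Pre_distAno; infer_instance
def pvWitness_distAno : List (List Int) := [[1, 2, 3], [0, 0, 3, 9], [5, 6, 4]]

def Spec_distAno (obras : List (List Int)) (out : List (Int × Int)) : Prop := out = distAno_alt obras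
instance (obras : List (List Int)) (out : List (Int × Int)) : Decidable (Spec_distAno obras out) := by unfold Spec_distAno; infer_instance

-- ===== CLAIM (what is proved, stated in full; the proofs are below) =====
def Claim_equal_distAno : Prop := ∀ (obras : List (List Int)), Dom_distAno obras → Pre_distAno obras → Spec_distAno obras (distAno obras)

-- ===== LEMMAS AND PROOFS =====

-- A's two branches are one counter step: in the 'else' branch the key is absent, so getD = 0.
theorem distAno_step_eq (res : PySem.Dict Int Int) (a : Int) :
    (if res.contains a then res.insert a (res.getD a 0 + 1) else res.insert a 1)
      = res.insert a (res.getD a 0 + 1) := by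
  by_cases h : res.contains a = true
  · simp [h]
  · simp [h, PySem.Dict.getD_of_not_contains res 0 (by simpa using h)]

-- ===== VERDICT (by name: the statement is the Claim_ definition above) =====
theorem distAno_spec : Claim_equal_distAno := by
  intro obras _ _
  unfold Spec_distAno distAno distAno_alt
  rw [show (fun (res : PySem.Dict Int Int) (row : List Int) =>
        let ano := (PySem.List.pyGet? row 2).getD 0
        if res.contains ano then res.insert ano (res.getD ano 0 + 1)
        else res.insert ano 1)
      = fun res row => res.insert ((PySem.List.pyGet? row 2).getD 0)
          (res.getD ((PySem.List.pyGet? row 2).getD 0) 0 + 1) from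
    funext fun res => funext fun row => distAno_step_eq res _]
  rw [← List.foldl_map (f := fun row : List Int => (PySem.List.pyGet? row 2).getD 0)
      (g := fun (res : PySem.Dict Int Int) a => res.insert a (res.getD a 0 + 1))]
  rw [PySem.Dict.foldl_insert_getD_add_one_eq_counter, PySem.Dict.items_counter]
  simp [PySem.List.dedup_eq_ofList]
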